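-- pv_equiv track=rewrite | github.com/6uu1/gpt-load | scripts/validate-keys.py | deduplicate_keys
-- ===== SOURCE A (Python) =====
-- from typing import List, Dict, Tuple, Optional
--
-- def deduplicate_keys(keys: List[str]) -> Tuple[List[str], List[str]]:
--     """去重密钥，返回(唯一密钥列表, 重复密钥列表)"""
--     seen = set()
--     unique_keys = []
--     duplicate_keys = []
--
--     for key in keys:
--         if key not in seen:
--             seen.add(key)
--             unique_keys.append(key)
--         else:
--             duplicate_keys.append(key)
--
--     return unique_keys, duplicate_keys
-- ===== SOURCE B (Python) =====
-- def deduplicate_keys(keys):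
--     """去重密钥，返回(唯一密钥列表, 重复密钥列表)"""
--     unique_keys = list(dict.fromkeys(keys))
--     duplicate_keys = list(keys)
--     for k in unique_keys:
--         duplicate_keys.remove(k)
--     return unique_keys, duplicate_keys
-- ===== Notes on version B (the rewrite author's own statement) =====
-- stated objective: idiomatic
-- what changed: Replaces the seen-set single-pass partition with dict.fromkeys for the ordered dedup plus removing each unique key's first occurrence from a copy of keys to leave the duplicates.
import Mathlib
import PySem

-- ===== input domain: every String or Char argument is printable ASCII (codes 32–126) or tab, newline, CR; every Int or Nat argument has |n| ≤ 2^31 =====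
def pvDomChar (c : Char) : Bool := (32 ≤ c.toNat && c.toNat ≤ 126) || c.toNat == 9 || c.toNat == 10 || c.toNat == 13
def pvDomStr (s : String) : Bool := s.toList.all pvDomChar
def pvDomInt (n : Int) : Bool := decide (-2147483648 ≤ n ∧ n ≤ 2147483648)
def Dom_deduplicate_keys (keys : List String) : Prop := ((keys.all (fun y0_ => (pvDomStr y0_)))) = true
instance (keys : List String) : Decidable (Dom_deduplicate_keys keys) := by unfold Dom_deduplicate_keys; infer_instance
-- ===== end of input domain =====

-- B replaces A's seen-set single-pass partition by dict.fromkeys dedup plus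
-- removing each unique key's first occurrence from a copy of keys (idiomatic; not faster).

-- ===== PORT A =====
-- single pass maintaining (seen set, unique accumulator, duplicate accumulator)
def deduplicate_keys (keys : List String) : List String × List String :=
  let st := keys.foldl
    (fun (st : PySem.Set String × List String × List String) key =>
      if !(PySem.Set.contains st.1 key) then
        (PySem.Set.add st.1 key, st.2.1 ++ [key], st.2.2)
      else
        (st.1, st.2.1, st.2.2 ++ [key]))
    (PySem.Set.empty, [], [])
  (st.2.1, st.2.2)

-- ===== PORT B =====
-- dict.fromkeys(keys) = PySem.List.dedup; each dup.remove(k) succeeds (k ∈ keys),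
-- so the total form .getD acc is exact here.
def deduplicate_keys_alt (keys : List String) : List String × List String :=
  let unique_keys := PySem.List.dedup keys
  let duplicate_keys := unique_keys.foldl
    (fun acc k => (PySem.List.remove? acc k).getD acc) keys
  (unique_keys, duplicate_keys)

-- ===== PRECONDITION & SPEC =====
def Spec_deduplicate_keys (keys : List String) (out : List String × List String) : Prop := out = deduplicate_keys_alt keys
instance (keys : List String) (out : List String × List String) : Decidable (Spec_deduplicate_keys keys out) := by unfold Spec_deduplicate_keys; infer_instance

-- ===== CLAIM (what is proved, stated in full; the proofs are below) =====
def Claim_equal_deduplicate_keys : Prop := ∀ (keys : List String), Dom_deduplicate_keys keys → Spec_deduplicate_keys keys (deduplicate_keys keys)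

-- ===== LEMMAS AND PROOFS =====

-- reference recursions: unique / duplicate part of `keys` given an already-seen set
def pvDedupE (seen : PySem.Set String) : List String → List String
  | [] => []
  | k :: t => if PySem.Set.contains seen k then pvDedupE seen t
              else k :: pvDedupE (PySem.Set.add seen k) t

def pvDupE (seen : PySem.Set String) : List String → List String
  | [] => []
  | k :: t => if PySem.Set.contains seen k then k :: pvDupE seen t
              else pvDupE (PySem.Set.add seen k) t

-- A's fold computes (update, ++ pvDedupE, ++ pvDupE)
theorem pvFoldA (keys : List String) : ∀ (seen : PySem.Set String) (u d : List String),
    keys.foldl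
      (fun (st : PySem.Set String × List String × List String) key =>
        if !(PySem.Set.contains st.1 key) then
          (PySem.Set.add st.1 key, st.2.1 ++ [key], st.2.2)
        else
          (st.1, st.2.1, st.2.2 ++ [key]))
      (seen, u, d)
    = (PySem.Set.update seen keys, u ++ pvDedupE seen keys, d ++ pvDupE seen keys) := by
  induction keys with
  | nil => intro seen u d; simp [pvDedupE, pvDupE, PySem.Set.update]
  | cons k t ih =>
    intro seen u d
    simp only [List.foldl]
    by_cases h : PySem.Set.contains seen k = true
    · have hm := (PySem.Set.contains_iff seen k).mp h
      rw [if_neg (by simp [hm]), ih]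
      simp [pvDedupE, pvDupE, hm, PySem.Set.update_cons]
    · have hm : k ∉ seen := fun hmem => h ((PySem.Set.contains_iff seen k).mpr hmem)
      rw [if_pos (by simp [hm]), ih]
      simp [pvDedupE, pvDupE, hm, PySem.Set.update_cons]

-- dict.fromkeys as foldl add equals pvDedupE appended to the seed
theorem pvFoldAdd (keys : List String) : ∀ (seen : PySem.Set String),
    keys.foldl PySem.Set.add seen = seen ++ pvDedupE seen keys := by
  induction keys with
  | nil => intro seen; simp [pvDedupE]
  | cons k t ih =>
    intro seen
    simp only [List.foldl]
    by_cases h : PySem.Set.contains seen k = true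
    · have hm := (PySem.Set.contains_iff seen k).mp h
      rw [PySem.Set.add_of_mem hm, ih]
      simp [pvDedupE, hm]
    · have hm : k ∉ seen := fun hmem => h ((PySem.Set.contains_iff seen k).mpr hmem)
      rw [PySem.Set.add_of_not_mem hm, ih]
      simp [pvDedupE, hm]

-- removing a key different from the head position
theorem pvRemoveCons (x k : String) (t : List String) (h : ¬ x = k) :
    ((PySem.List.remove? (x :: t) k).getD (x :: t)) = x :: ((PySem.List.remove? t k).getD t) := by
  rw [PySem.List.remove?_cons_of_ne t h]
  cases PySem.List.remove? t k <;> simp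

-- elements produced by pvDedupE are never in `seen`
theorem pvDedupE_not_seen (keys : List String) : ∀ (seen : PySem.Set String) (x : String),
    x ∈ pvDedupE seen keys → ¬ x ∈ seen := by
  induction keys with
  | nil => intro seen x hx; simp [pvDedupE] at hx
  | cons k t ih =>
    intro seen x hx
    by_cases h : PySem.Set.contains seen k = true
    · simp only [pvDedupE, h, if_pos] at hx
      exact ih seen x hx
    · simp only [pvDedupE, h, Bool.false_eq_true, if_neg, not_false_iff, List.mem_cons] at hx
      rcases hx with rfl | hx
      · exact fun hmem => h ((PySem.Set.contains_iff seen x).mpr hmem)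
      · intro hmem
        exact ih (PySem.Set.add seen k) x hx (by simp [PySem.Set.mem_add, hmem])

-- folding removes over a list of keys all different from the head
theorem pvFoldRemoveCons (u : List String) (x : String) (t : List String)
    (h : ∀ k ∈ u, ¬ x = k) :
    u.foldl (fun acc k => (PySem.List.remove? acc k).getD acc) (x :: t)
    = x :: u.foldl (fun acc k => (PySem.List.remove? acc k).getD acc) t := by
  induction u generalizing t with
  | nil => simp
  | cons k u' ih =>
    simp only [List.foldl]
    rw [pvRemoveCons x k t (h k (by simp))]
    exact ih _ (fun k hk => h k (by simp [hk]))

-- MAIN: removing the unique keys from `keys` leaves exactly the duplicates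
theorem pvFoldRemove (keys : List String) : ∀ (seen : PySem.Set String),
    (pvDedupE seen keys).foldl (fun acc k => (PySem.List.remove? acc k).getD acc) keys
    = pvDupE seen keys := by
  induction keys with
  | nil => intro seen; simp [pvDedupE, pvDupE]
  | cons x t ih =>
    intro seen
    by_cases h : PySem.Set.contains seen x = true
    · simp only [pvDedupE, pvDupE, h, if_pos]
      rw [pvFoldRemoveCons _ x t ?_, ih seen]
      intro k hk hkx
      exact pvDedupE_not_seen t seen k hk (hkx ▸ (PySem.Set.contains_iff seen x).mp h)
    · simp only [pvDedupE, pvDupE, h, Bool.false_eq_true, if_neg, not_false_iff, List.foldl,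
        PySem.List.remove?_cons_self, Option.getD_some]
      exact ih (PySem.Set.add seen x)

theorem pvDedup_eq (keys : List String) : PySem.List.dedup keys = pvDedupE PySem.Set.empty keys := by
  rw [PySem.List.dedup_eq_ofList, PySem.Set.ofList_eq_foldl]
  simpa [PySem.Set.empty] using pvFoldAdd keys PySem.Set.empty

-- ===== VERDICT (by name: the statement is the Claim_ definition above) =====
theorem deduplicate_keys_spec : Claim_equal_deduplicate_keys := by
  intro keys _
  unfold Spec_deduplicate_keys deduplicate_keys deduplicate_keys_alt
  simp only [pvFoldA, pvDedup_eq, pvFoldRemove, List.nil_append]
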